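-- pv_equiv track=rewrite | github.com/fkutzner/PyCSCL | tests/cscl/test_cardinality_constraints_encoders.py | has_k_bits_trivial
-- ===== SOURCE A (Python) =====
-- def has_k_bits_trivial(i, k):
--     """
--     Determines whether i has exactly k bits set to one.
--
--     :param i: A non-negative integer.
--     :param k: A non-negative integer
--     :return: True if i has exactly k bits set to one, False otherwise.
--     """
--     assert(i >= 0)
--
--     counter = 0
--     while i > 0:
--         if i & 1 != 0:
--             counter += 1
--         i = i >> 1
--
--     return counter == k
-- ===== SOURCE B (Python) =====
-- def has_k_bits_trivial(i, k):
--     """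
--     Determines whether i has exactly k bits set to one.
--
--     Recursive Kernighan decomposition: each call clears the lowest set bit
--     and asks whether the rest has k-1 set bits; no counter is kept, the
--     budget k is consumed instead, and the base case decides directly.
--     """
--     assert(i >= 0)
--     if i == 0:
--         return k == 0
--     return has_k_bits_trivial(i & (i - 1), k - 1)
-- ===== Notes on version B (the rewrite author's own statement) =====
-- stated objective: alternative
-- what changed: Replaces A's iterative bit-by-bit shift scan with an accumulating counter by a recursive Kernighan decomposition: each call clears the lowest set bit and decrements the budget k, with no counter, no shift, no branch on the low bit, and the answer decided at the i==0 base case.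
import Mathlib
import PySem

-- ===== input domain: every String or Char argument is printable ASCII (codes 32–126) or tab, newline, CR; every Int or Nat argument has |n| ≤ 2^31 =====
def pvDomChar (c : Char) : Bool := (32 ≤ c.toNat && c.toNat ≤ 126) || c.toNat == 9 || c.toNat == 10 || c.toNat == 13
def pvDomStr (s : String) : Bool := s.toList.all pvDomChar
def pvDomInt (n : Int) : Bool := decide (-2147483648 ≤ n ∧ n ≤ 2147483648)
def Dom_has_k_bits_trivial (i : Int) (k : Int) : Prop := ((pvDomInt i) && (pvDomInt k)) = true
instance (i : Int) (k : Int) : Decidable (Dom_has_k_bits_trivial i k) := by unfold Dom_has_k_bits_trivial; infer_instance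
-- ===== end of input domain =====

-- B replaces A's iterative shift-and-count loop by a recursive Kernighan decomposition
-- (clear lowest set bit, decrement the budget k, decide at the base case) — alternative algorithm, same results.

-- ===== PORT A =====
-- termination helper for A's loop, cited by decreasing_by
theorem pvShiftLt (i : Int) (h : 0 < i) : (i >>> (1 : Nat)).toNat < i.toNat := by
  have hn : i = ((i.toNat : Nat) : Int) := by omega
  rw [hn]
  have : ((i.toNat : Nat) : Int) >>> (1 : Nat) = ((i.toNat >>> 1 : Nat) : Int) := by
    simp [Int.natCast_shiftRight]
  rw [this]
  simp [Nat.shiftRight_eq_div_pow]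
  omega

-- while i > 0: if i & 1 != 0: counter += 1; i = i >> 1
def pvLoopA (i : Int) (counter : Int) : Int :=
  if h : 0 < i then
    pvLoopA (i >>> (1 : Nat)) (if PySem.Int.band i 1 ≠ 0 then counter + 1 else counter)
  else counter
termination_by i.toNat
decreasing_by exact pvShiftLt i h

def has_k_bits_trivial (i : Int) (k : Int) : Bool :=
  -- assert(i >= 0): raises for i < 0, excluded by Pre_
  pvLoopA i 0 == k

-- ===== PORT B =====
-- termination helper for B's recursion, cited by decreasing_by
theorem pvClearLt (i : Int) (h : 0 < i) : (PySem.Int.band i (i - 1)).toNat < i.toNat := by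
  have hn : i = ((i.toNat : Nat) : Int) := by omega
  have hc : ((i.toNat : Nat) : Int) - 1 = ((i.toNat - 1 : Nat) : Int) := by omega
  rw [hn, hc, PySem.Int.band_natCast]
  have := Nat.and_le_right (n := i.toNat) (m := i.toNat - 1)
  omega

-- if i == 0: return k == 0; return has_k_bits_trivial(i & (i - 1), k - 1)
def has_k_bits_trivial_alt (i : Int) (k : Int) : Bool :=
  -- assert(i >= 0): raises for i < 0, excluded by Pre_
  if h : 0 < i then
    has_k_bits_trivial_alt (PySem.Int.band i (i - 1)) (k - 1)
  else k == 0
termination_by i.toNat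
decreasing_by exact pvClearLt i h

-- ===== PRECONDITION & SPEC =====
-- Pre_ excludes i < 0, on which both Pythons' `assert(i >= 0)` raises AssertionError.
def Pre_has_k_bits_trivial (i : Int) (k : Int) : Prop := 0 ≤ i
instance (i : Int) (k : Int) : Decidable (Pre_has_k_bits_trivial i k) := by unfold Pre_has_k_bits_trivial; infer_instance
def pvWitness_has_k_bits_trivial : Int × Int := (13, 3)

def Spec_has_k_bits_trivial (i : Int) (k : Int) (out : Bool) : Prop := out = has_k_bits_trivial_alt i k
instance (i : Int) (k : Int) (out : Bool) : Decidable (Spec_has_k_bits_trivial i k out) := by unfold Spec_has_k_bits_trivial; infer_instance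

-- ===== CLAIM (what is proved, stated in full; the proofs are below) =====
def Claim_equal_has_k_bits_trivial : Prop := ∀ (i : Int) (k : Int), Dom_has_k_bits_trivial i k → Pre_has_k_bits_trivial i k → Spec_has_k_bits_trivial i k (has_k_bits_trivial i k)

-- ===== LEMMAS AND PROOFS =====

-- popcount spec both programs are proved against
def pvPc (n : Nat) : Nat :=
  if n = 0 then 0 else n % 2 + pvPc (n / 2)
decreasing_by omega

theorem pvPc_zero : pvPc 0 = 0 := by simp [pvPc]
theorem pvPc_pos (n : Nat) (h : 0 < n) : pvPc n = n % 2 + pvPc (n / 2) := by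
  rw [pvPc]; simp [Nat.pos_iff_ne_zero.mp h]

theorem pvAnd_mod_two (m n : Nat) : (m &&& n) % 2 = min (m % 2) (n % 2) := by
  have h := Nat.and_mod_two_eq_one (a := m) (b := n)
  omega

-- Kernighan's step clears exactly one set bit
theorem pvPc_clear (n : Nat) (h : 0 < n) : pvPc n = pvPc (n &&& (n - 1)) + 1 := by
  induction n using Nat.strong_induction_on with
  | _ n ih =>
    have hmod := pvAnd_mod_two n (n - 1)
    have hdiv : (n &&& (n - 1)) / 2 = n / 2 &&& (n - 1) / 2 := by
      simp [Nat.and_div_two]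
    by_cases hp : n % 2 = 1
    · -- n odd: n &&& (n-1) = n - 1, an even number with the same higher bits
      have hsame : (n - 1) / 2 = n / 2 := by omega
      have hand : n &&& (n - 1) = n - 1 := by
        have hself : n / 2 &&& n / 2 = n / 2 := Nat.and_self _
        rw [hsame, hself] at hdiv
        omega
      rw [hand, pvPc_pos n h]
      by_cases h1 : n = 1
      · subst h1; norm_num [pvPc_zero]
      · rw [pvPc_pos (n - 1) (by omega), hsame]
        omega
    · -- n even: recurse on n / 2
      have hp0 : n % 2 = 0 := by omega
      have hhalf : (n - 1) / 2 = n / 2 - 1 := by omega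
      have hih := ih (n / 2) (by omega) (by omega)
      set t := n / 2 &&& (n / 2 - 1) with ht
      have hand : n &&& (n - 1) = 2 * t := by
        rw [hhalf] at hdiv
        omega
      rw [hand, pvPc_pos n h, hp0, hih]
      by_cases ht0 : t = 0
      · simp [ht0, pvPc_zero]
      · rw [pvPc_pos (2 * t) (by omega)]
        have h2 : 2 * t / 2 = t := by omega
        rw [h2]
        omega

theorem pvLoopA_eq (n : Nat) : ∀ c : Int, pvLoopA (n : Int) c = c + (pvPc n : Int) := by
  induction n using Nat.strong_induction_on with
  | _ n ih =>
    intro c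
    by_cases h0 : n = 0
    · subst h0; rw [pvLoopA]; simp [pvPc_zero]
    · have hpos : (0 : Int) < (n : Int) := by omega
      rw [pvLoopA]
      simp only [hpos, dite_true]
      have hsh : ((n : Nat) : Int) >>> (1 : Nat) = ((n >>> 1 : Nat) : Int) := by
        simp [Int.natCast_shiftRight]
      have hband : PySem.Int.band (n : Int) 1 = ((n &&& 1 : Nat) : Int) := by
        have := PySem.Int.band_natCast n 1
        simpa using this
      rw [hsh, hband, ih (n >>> 1) (by simp [Nat.shiftRight_eq_div_pow]; omega)]
      have h1 : n &&& 1 = n % 2 := Nat.and_one_is_mod n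
      have hsd : n >>> 1 = n / 2 := by simp [Nat.shiftRight_eq_div_pow]
      rw [h1, hsd, pvPc_pos n (by omega)]
      by_cases hp : n % 2 = 1
      · have hne : ((n % 2 : Nat) : Int) ≠ 0 := by omega
        rw [if_pos hne]
        push_cast
        omega
      · have hp0 : n % 2 = 0 := by omega
        have hne : ¬ ((n % 2 : Nat) : Int) ≠ 0 := by omega
        rw [if_neg hne]
        push_cast
        omega

-- B decides k = popcount(i) by consuming the budget k
theorem pvAlt_eq (n : Nat) : ∀ k : Int, has_k_bits_trivial_alt (n : Int) k = (k == (pvPc n : Int)) := by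
  induction n using Nat.strong_induction_on with
  | _ n ih =>
    intro k
    by_cases h0 : n = 0
    · subst h0; rw [has_k_bits_trivial_alt]; simp [pvPc_zero]
    · have hpos : (0 : Int) < (n : Int) := by omega
      rw [has_k_bits_trivial_alt]
      simp only [hpos, dite_true]
      have hn1 : ((n : Int) - 1) = ((n - 1 : Nat) : Int) := by omega
      have hband : PySem.Int.band (n : Int) ((n : Int) - 1) = ((n &&& (n - 1) : Nat) : Int) := by
        rw [hn1]; exact PySem.Int.band_natCast n (n - 1)
      have hlt : n &&& (n - 1) < n := by
        have := Nat.and_le_right (n := n) (m := n - 1)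
        omega
      rw [hband, ih (n &&& (n - 1)) hlt]
      rw [pvPc_clear n (by omega)]
      push_cast
      rw [Bool.eq_iff_iff]
      simp only [beq_iff_eq]
      omega

-- ===== VERDICT (by name: the statement is the Claim_ definition above) =====
theorem has_k_bits_trivial_spec : Claim_equal_has_k_bits_trivial := by
  intro i k _ hpre
  unfold Spec_has_k_bits_trivial has_k_bits_trivial
  have hi : i = ((i.toNat : Nat) : Int) := by
    unfold Pre_has_k_bits_trivial at hpre; omega
  rw [hi, pvLoopA_eq, pvAlt_eq]
  simp [beq_iff_eq, eq_comm]
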